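-- pv_equiv track=rewrite | github.com/Mosder/agh | sem2/asd/kolosy/kol1/kol1.py | maxrank
-- ===== SOURCE A (Python) =====
-- def maxrank(T):
--     n = len(T)
--     if n == 0: return 0
--     mx, next = findAmountAndNext(T, n-1)
--     while next != None:
--         amount, next = findAmountAndNext(T, next)
--         mx = max(mx, amount)
--     return mx
--
-- def findAmountAndNext(arr, last):
--     maxInd = None
--     count = 0
--     for j in range(last):
--         if arr[j] > arr[last]:
--             maxInd = j
--         elif arr[j] < arr[last]:
--             count += 1
--     return count, maxInd
-- ===== SOURCE B (Python) =====
-- def maxrank(T):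
--     # One right-to-left pass: the chase of previous-greater pointers in A visits
--     # exactly the strict suffix records, so detect them with a running maximum.
--     n = len(T)
--     if n == 0:
--         return 0
--     best = 0
--     m = None
--     for i in range(n - 1, -1, -1):
--         if m is None or T[i] > m:
--             m = T[i]
--             c = 0
--             for x in T[:i]:
--                 if x < T[i]:
--                     c += 1
--             best = max(best, c)
--     return best
-- ===== Notes on version B (the rewrite author's own statement) =====
-- stated objective: alternative
-- what changed: A repeatedly rescans the prefix to chase previous-greater pointers; B makes a single right-to-left running-maximum pass, identifying the chain nodes as strict suffix records, and takes the max of the smaller-to-the-left counts at those records.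
import Mathlib
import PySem

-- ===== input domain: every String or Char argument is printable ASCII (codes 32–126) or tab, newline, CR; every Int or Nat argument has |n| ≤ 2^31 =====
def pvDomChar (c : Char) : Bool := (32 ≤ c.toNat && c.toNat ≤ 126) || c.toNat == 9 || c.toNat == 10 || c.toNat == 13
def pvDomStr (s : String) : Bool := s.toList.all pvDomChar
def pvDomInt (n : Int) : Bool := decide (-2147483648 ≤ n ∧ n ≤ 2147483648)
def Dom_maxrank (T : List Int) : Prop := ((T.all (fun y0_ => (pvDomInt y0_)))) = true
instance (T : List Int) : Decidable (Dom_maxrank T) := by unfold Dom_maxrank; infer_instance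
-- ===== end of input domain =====

-- B replaces A's previous-greater pointer chasing by a single right-to-left
-- running-maximum pass over suffix records (alternative algorithm, same worst-case cost).

-- ===== PORT A =====
-- every index used is in range (0 ≤ j < last < len arr at all call sites), so pyGetD is exact
def findAmountAndNext (arr : List Int) (last : Nat) : Int × Option Nat :=
  let av := PySem.List.pyGetD arr (last : Int) 0
  (List.range last).foldl
    (fun (st : Int × Option Nat) (j : Nat) =>
      let x := PySem.List.pyGetD arr (j : Int) 0
      if x > av then (st.1, some j)
      else if x < av then (st.1 + 1, st.2)
      else st)
    (0, none)

-- Python's `while next != None` loop; fuel T.length is enough since `next` strictly decreases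
def maxrankLoop (T : List Int) : Nat → Int → Option Nat → Int
  | _, mx, none => mx
  | 0, mx, some _ => mx
  | f + 1, mx, some nxt =>
      let p := findAmountAndNext T nxt
      maxrankLoop T f (max mx p.1) p.2

def maxrank (T : List Int) : Int :=
  let n := T.length
  if n = 0 then 0
  else
    let p := findAmountAndNext T (n - 1)
    maxrankLoop T n p.1 p.2

-- ===== PORT B =====
-- `c` loop of Source B: count of elements of T[:i] smaller than T[i]
def countSmallerLeft (T : List Int) (i : Nat) : Int :=
  let v := PySem.List.pyGetD T (i : Int) 0
  (PySem.List.slice T (some 0) (some (i : Int))).foldl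
    (fun c x => if x < v then c + 1 else c) 0

-- body of Source B's `for i in range(n-1,-1,-1)` loop, state (best, m)
def altStep (T : List Int) (st : Int × Option Int) (i : Nat) : Int × Option Int :=
  let v := PySem.List.pyGetD T (i : Int) 0
  match st.2 with
  | none => (max st.1 (countSmallerLeft T i), some v)
  | some m => if v > m then (max st.1 (countSmallerLeft T i), some v) else st

def maxrank_alt (T : List Int) : Int :=
  let n := T.length
  if n = 0 then 0
  -- range(n-1, -1, -1) is the reverse of range(n)
  else ((List.range n).reverse.foldl (altStep T) (0, none)).1

-- ===== PRECONDITION & SPEC =====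
def Spec_maxrank (T : List Int) (out : Int) : Prop := out = maxrank_alt T
instance (T : List Int) (out : Int) : Decidable (Spec_maxrank T out) := by unfold Spec_maxrank; infer_instance

-- ===== CLAIM (what is proved, stated in full; the proofs are below) =====
def Claim_equal_maxrank : Prop := ∀ (T : List Int), Dom_maxrank T → Spec_maxrank T (maxrank T)

-- ===== LEMMAS AND PROOFS =====

-- number of j < i with T[j] < v
def cntv (T : List Int) (v : Int) : Nat → Int
  | 0 => 0
  | j + 1 => cntv T v j + (if T.getD j 0 < v then 1 else 0)

-- last j < i with T[j] > v (A's maxInd)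
def pgv (T : List Int) (v : Int) : Nat → Option Nat
  | 0 => none
  | j + 1 => if T.getD j 0 > v then some j else pgv T v j

theorem pgv_lt {T : List Int} {v : Int} : ∀ {j p : Nat}, pgv T v j = some p → p < j
  | 0, p, h => by simp [pgv] at h
  | j + 1, p, h => by
      unfold pgv at h
      split at h
      · cases h; omega
      · exact Nat.lt_succ_of_lt (pgv_lt h)

-- max of cntv along A's previous-greater chain starting at i
def chainMax (T : List Int) (i : Nat) : Int :=
  match h : pgv T (T.getD i 0) i with
  | none => cntv T (T.getD i 0) i
  | some p => max (cntv T (T.getD i 0) i) (chainMax T p)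
termination_by i
decreasing_by exact pgv_lt h

theorem chainMax_none {T : List Int} {i : Nat} (h : pgv T (T.getD i 0) i = none) :
    chainMax T i = cntv T (T.getD i 0) i := by
  rw [chainMax.eq_def]; split <;> simp_all

theorem chainMax_some {T : List Int} {i p : Nat} (h : pgv T (T.getD i 0) i = some p) :
    chainMax T i = max (cntv T (T.getD i 0) i) (chainMax T p) := by
  rw [chainMax.eq_def]; split <;> simp_all

theorem cntv_succ (T : List Int) (v : Int) (j : Nat) :
    cntv T v (j + 1) = cntv T v j + (if T.getD j 0 < v then 1 else 0) := rfl

theorem pgv_succ (T : List Int) (v : Int) (j : Nat) :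
    pgv T v (j + 1) = if T.getD j 0 > v then some j else pgv T v j := rfl

theorem cntv_nonneg (T : List Int) (v : Int) (j : Nat) : 0 ≤ cntv T v j := by
  induction j with
  | zero => simp [cntv]
  | succ j ih => unfold cntv; split <;> omega

theorem chainMax_nonneg (T : List Int) : ∀ i, 0 ≤ chainMax T i := by
  intro i
  induction i using Nat.strong_induction_on with
  | _ i ih =>
      cases h : pgv T (T.getD i 0) i with
      | none => rw [chainMax_none h]; exact cntv_nonneg _ _ _
      | some p =>
          rw [chainMax_some h]
          exact le_max_of_le_left (cntv_nonneg _ _ _)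

-- A's scan with a fixed pivot value v computes (cntv, pgv)
theorem fa_aux (T : List Int) (v : Int) : ∀ (k : Nat),
    (List.range k).foldl
      (fun (st : Int × Option Nat) (j : Nat) =>
        if T.getD j 0 > v then (st.1, some j)
        else if T.getD j 0 < v then (st.1 + 1, st.2) else st)
      (0, none)
    = (cntv T v k, pgv T v k) := by
  intro k
  induction k with
  | zero => simp [cntv, pgv]
  | succ j ih =>
      rw [List.range_succ, List.foldl_append, ih]
      simp only [List.foldl_cons, List.foldl_nil, cntv_succ, pgv_succ]
      by_cases h1 : T.getD j 0 > v
      · have h2 : ¬ (T.getD j 0 < v) := by omega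
        simp only [if_pos h1, if_neg h2, add_zero]
      · by_cases h2 : T.getD j 0 < v
        · simp only [if_neg h1, if_pos h2]
        · simp only [if_neg h1, if_neg h2, add_zero]

theorem fa_eq (T : List Int) (i : Nat) :
    findAmountAndNext T i = (cntv T (T.getD i 0) i, pgv T (T.getD i 0) i) := by
  have h := fa_aux T (T.getD i 0) i
  unfold findAmountAndNext
  simp only [PySem.List.pyGetD_natCast]
  exact h

theorem maxrankLoop_none (T : List Int) (f : Nat) (mx : Int) :
    maxrankLoop T f mx none = mx := by
  cases f <;> rfl

-- A's fueled while-loop computes max mx (chainMax j) when enough fuel remains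
theorem loopA (T : List Int) : ∀ (f j : Nat), j < f → ∀ mx,
    maxrankLoop T f mx (some j) = max mx (chainMax T j) := by
  intro f
  induction f with
  | zero => intro j hj; omega
  | succ f ih =>
      intro j hj mx
      show maxrankLoop T f (max mx (findAmountAndNext T j).1) (findAmountAndNext T j).2 = _
      rw [fa_eq]
      dsimp only
      cases h : pgv T (T.getD j 0) j with
      | none => rw [maxrankLoop_none, chainMax_none h]
      | some p =>
          have hp : p < j := pgv_lt h
          rw [ih p (by omega) (max mx (cntv T (T.getD j 0) j))]
          rw [chainMax_some h, max_assoc]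

theorem maxrank_eq_chainMax (T : List Int) (hT : T.length ≠ 0) :
    maxrank T = chainMax T (T.length - 1) := by
  unfold maxrank
  simp only [hT, if_false]
  rw [fa_eq]
  dsimp only
  cases h : pgv T (T.getD (T.length - 1) 0) (T.length - 1) with
  | none => rw [maxrankLoop_none, chainMax_none h]
  | some p =>
      have hp : p < T.length - 1 := pgv_lt h
      rw [loopA T T.length p (by omega)]
      rw [chainMax_some h]

-- B's count loop equals cntv (for i within the list)
theorem csl_aux (T : List Int) (v : Int) : ∀ (i : Nat), i ≤ T.length →
    (T.take i).foldl (fun c x => if x < v then c + 1 else c) 0 = cntv T v i := by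
  intro i
  induction i with
  | zero => simp [cntv]
  | succ j ih =>
      intro hj
      have hjl : j < T.length := by omega
      rw [List.take_add_one, List.foldl_append, ih (by omega)]
      simp only [List.getElem?_eq_getElem hjl, Option.toList_some, List.foldl_cons,
        List.foldl_nil]
      rw [cntv_succ, List.getD_eq_getElem T 0 hjl]
      by_cases hx : T[j]'hjl < v
      · simp [hx]
      · simp [hx]

theorem countSmallerLeft_eq (T : List Int) (i : Nat) (hi : i ≤ T.length) :
    countSmallerLeft T i = cntv T (T.getD i 0) i := by
  unfold countSmallerLeft
  simp only [PySem.List.pyGetD_natCast, PySem.List.slice_zero_start,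
    PySem.List.slice_to_natCast]
  exact csl_aux T (T.getD i 0) i hi

theorem altStep_some (T : List Int) (best m : Int) (i : Nat) :
    altStep T (best, some m) i =
      if T.getD i 0 > m then (max best (countSmallerLeft T i), some (T.getD i 0))
      else (best, some m) := by
  unfold altStep
  simp [PySem.List.pyGetD_natCast]

theorem altStep_none (T : List Int) (best : Int) (i : Nat) :
    altStep T (best, none) i = (max best (countSmallerLeft T i), some (T.getD i 0)) := by
  unfold altStep
  simp [PySem.List.pyGetD_natCast]

-- B's reverse pass, once the running max is some v, computes chainMax of
-- the last index below j whose value exceeds v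
theorem loopB (T : List Int) : ∀ (j : Nat), j ≤ T.length → ∀ (v best : Int),
    ((List.range j).reverse.foldl (altStep T) (best, some v)).1
      = match pgv T v j with
        | none => best
        | some p => max best (chainMax T p) := by
  intro j
  induction j with
  | zero => intro _ v best; simp [pgv]
  | succ j ih =>
      intro hj v best
      rw [List.range_succ, List.reverse_append, List.reverse_singleton]
      simp only [List.singleton_append, List.foldl_cons]
      rw [altStep_some]
      by_cases h1 : T.getD j 0 > v
      · rw [if_pos h1, ih (by omega), countSmallerLeft_eq T j (by omega)]
        rw [pgv_succ, if_pos h1]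
        cases h2 : pgv T (T.getD j 0) j with
        | none => dsimp only; rw [chainMax_none h2]
        | some p => dsimp only; rw [chainMax_some h2, max_assoc]
      · rw [if_neg h1, ih (by omega)]
        rw [pgv_succ, if_neg h1]

theorem maxrank_alt_eq_chainMax (T : List Int) (hT : T.length ≠ 0) :
    maxrank_alt T = max 0 (chainMax T (T.length - 1)) := by
  unfold maxrank_alt
  simp only [hT, if_false]
  obtain ⟨n, hn⟩ : ∃ n, T.length = n + 1 := ⟨T.length - 1, by omega⟩
  rw [hn]
  rw [List.range_succ, List.reverse_append, List.reverse_singleton]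
  simp only [List.singleton_append, List.foldl_cons]
  rw [altStep_none, loopB T n (by omega), countSmallerLeft_eq T n (by omega)]
  simp only [Nat.add_sub_cancel]
  cases h : pgv T (T.getD n 0) n with
  | none => dsimp only; rw [chainMax_none h]
  | some p => dsimp only; rw [chainMax_some h, max_assoc]

-- ===== VERDICT (by name: the statement is the Claim_ definition above) =====
theorem maxrank_spec : Claim_equal_maxrank := by
  intro T _
  unfold Spec_maxrank
  by_cases hT : T.length = 0
  · have h0 : T = [] := List.length_eq_zero_iff.mp hT
    subst h0; rfl
  · rw [maxrank_eq_chainMax T hT, maxrank_alt_eq_chainMax T hT]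
    have h := chainMax_nonneg T (T.length - 1)
    omega
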